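-- pv_equiv track=rewrite | github.com/thaReal/MasterChef | codeforces/round_632/array.py | solve
-- ===== SOURCE A (Python) =====
-- def solve(n, a):
-- 	cnt = 0
-- 	il = 0
-- 	ir = il + 1
-- 	while il < n:
-- 		while ir <= n:
-- 			if sum(a[il:ir]) != 0:
-- 				cnt += ir - il
-- 				ir += 1
-- 			else:
-- 				break
--
-- 		il += 1
-- 		if il == ir:
-- 			ir += 1
--
-- 	return cnt
-- ===== SOURCE B (Python) =====
-- def solve(n, a):
--     # prefix sums: pre[k] = sum of first k elements, so any window sum is one subtraction
--     pre = [0]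
--     s = 0
--     for x in a:
--         s += x
--         pre.append(s)
--     cnt = 0
--     il = 0
--     for r in range(1, n + 1):
--         while il < r and pre[il] == pre[r]:
--             il += 1
--         cnt += r - il
--     return cnt
-- ===== Notes on version B (the rewrite author's own statement) =====
-- stated objective: faster
-- what changed: B precomputes a prefix-sum table once and restructures the nested while/break/skip two-pointer into a single for-loop over right endpoints with a monotone left-pointer advance, so every window sum is one O(1) subtraction instead of an O(n) slice re-summation.
-- outside the precondition, e.g. on solve(3, [1]): A returns 6, B raises IndexError
import Mathlib
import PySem

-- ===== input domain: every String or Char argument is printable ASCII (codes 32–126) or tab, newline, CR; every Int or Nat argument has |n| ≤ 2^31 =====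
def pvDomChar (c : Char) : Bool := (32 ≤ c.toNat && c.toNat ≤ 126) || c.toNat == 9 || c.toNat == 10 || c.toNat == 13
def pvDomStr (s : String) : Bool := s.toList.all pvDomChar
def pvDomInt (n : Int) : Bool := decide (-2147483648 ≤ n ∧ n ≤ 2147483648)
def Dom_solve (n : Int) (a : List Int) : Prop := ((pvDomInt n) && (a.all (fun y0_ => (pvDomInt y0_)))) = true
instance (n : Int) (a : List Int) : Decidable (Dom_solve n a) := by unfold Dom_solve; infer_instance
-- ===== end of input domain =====

-- B replaces A's repeated slice re-summation by a precomputed prefix-sum table and a single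
-- for-loop over right endpoints with a monotone left pointer (faster: O(n) instead of O(n^2)).

-- ===== PORT A =====
-- inner 'while ir <= n' loop of A: returns the final (cnt, ir)
def solveInner (n : Int) (a : List Int) (il : Int) (cnt ir : Int) : Int × Int :=
  if h : ir ≤ n then
    if (PySem.List.slice a (some il) (some ir)).sum ≠ 0 then
      solveInner n a il (cnt + (ir - il)) (ir + 1)
    else (cnt, ir)
  else (cnt, ir)
termination_by (n + 1 - ir).toNat
decreasing_by exact (Int.toNat_lt_toNat (Int.sub_pos.mpr (Int.lt_add_one_of_le h))).mpr (sub_lt_sub_left (lt_add_one ir) (n + 1))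

-- outer 'while il < n' loop of A
def solveOuter (n : Int) (a : List Int) (cnt il ir : Int) : Int :=
  if h : il < n then
    let p := solveInner n a il cnt ir
    let il' := il + 1
    let ir' := if il' = p.2 then p.2 + 1 else p.2
    solveOuter n a p.1 il' ir'
  else cnt
termination_by (n - il).toNat
decreasing_by exact (Int.toNat_lt_toNat (Int.sub_pos.mpr h)).mpr (sub_lt_sub_left (lt_add_one il) n)

def solve (n : Int) (a : List Int) : Int := solveOuter n a 0 0 1

-- ===== PORT B =====
-- B's 'while il < r and pre[il] == pre[r]: il += 1' loop; pre[·] via pyGetD (in-range under Pre_)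
def altAdvance (pre : List Int) (r il : Int) : Int :=
  if h : il < r ∧ PySem.List.pyGetD pre il 0 = PySem.List.pyGetD pre r 0 then
    altAdvance pre r (il + 1)
  else il
termination_by (r - il).toNat
decreasing_by exact (Int.toNat_lt_toNat (Int.sub_pos.mpr h.1)).mpr (sub_lt_sub_left (lt_add_one il) r)

def solve_alt (n : Int) (a : List Int) : Int :=
  let pre := (a.foldl (fun (st : List Int × Int) x => (st.1 ++ [st.2 + x], st.2 + x)) ([0], 0)).1
  ((PySem.List.pyRange 1 (n + 1) 1).foldl
    (fun (st : Int × Int) r =>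
      let il := altAdvance pre r st.2
      (st.1 + (r - il), il)) (0, 0)).1

-- ===== PRECONDITION & SPEC =====
-- Pre_ excludes n > len(a): there A's out-of-range slices silently truncate and A counts phantom
-- windows past the end of the list, while B's pre[r] raises IndexError.
def Pre_solve (n : Int) (a : List Int) : Prop := n ≤ (a.length : Int)
instance (n : Int) (a : List Int) : Decidable (Pre_solve n a) := by unfold Pre_solve; infer_instance

def pvWitness_solve : Int × List Int := (2, [1, -1])

def Spec_solve (n : Int) (a : List Int) (out : Int) : Prop := out = solve_alt n a
instance (n : Int) (a : List Int) (out : Int) : Decidable (Spec_solve n a out) := by unfold Spec_solve; infer_instance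

-- ===== CLAIM (what is proved, stated in full; the proofs are below) =====
def Claim_equal_solve : Prop := ∀ (n : Int) (a : List Int), Dom_solve n a → Pre_solve n a → Spec_solve n a (solve n a)

-- ===== LEMMAS AND PROOFS =====

-- the list of running prefix sums starting from accumulator s
def preFrom (s : Int) : List Int → List Int
  | [] => []
  | x :: t => (s + x) :: preFrom (s + x) t

-- B's remaining fold, from frontier r with state (cnt, il)
def bFrom (pre : List Int) (n : Int) (cnt il r : Int) : Int :=
  ((PySem.List.pyRange r (n + 1) 1).foldl
    (fun (st : Int × Int) r =>
      let il := altAdvance pre r st.2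
      (st.1 + (r - il), il)) (cnt, il)).1

theorem foldl_pre (a : List Int) : ∀ (pre : List Int) (s : Int),
    (a.foldl (fun (st : List Int × Int) x => (st.1 ++ [st.2 + x], st.2 + x)) (pre, s)).1
      = pre ++ preFrom s a := by
  induction a with
  | nil => intro pre s; simp [preFrom]
  | cons x t ih => intro pre s; simp only [List.foldl_cons, preFrom]; rw [ih]; simp

theorem getD_preFrom (a : List Int) : ∀ (s : Int) (k : Nat), k < a.length →
    (preFrom s a).getD k 0 = s + (a.take (k + 1)).sum := by
  induction a with
  | nil => intro s k hk; simp at hk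
  | cons x t ih =>
    intro s k hk
    cases k with
    | zero => simp [preFrom]
    | succ k =>
      simp only [preFrom, List.getD_cons_succ, List.take_succ_cons, List.sum_cons]
      rw [ih (s + x) k (by simpa using hk)]; ring

theorem getD_pre (a : List Int) (k : Nat) (hk : k ≤ a.length) :
    (([0] ++ preFrom 0 a) : List Int).getD k 0 = (a.take k).sum := by
  cases k with
  | zero => simp
  | succ k =>
    simp only [List.singleton_append, List.getD_cons_succ]
    rw [getD_preFrom a 0 k (by omega)]; simp

theorem pyGetD_pre (a : List Int) (i : Int) (h0 : 0 ≤ i) (hk : i ≤ (a.length : Int)) :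
    PySem.List.pyGetD ([0] ++ preFrom 0 a) i 0 = (a.take i.toNat).sum := by
  have hi : i = ((i.toNat : Nat) : Int) := by omega
  rw [hi, PySem.List.pyGetD_natCast]
  exact getD_pre a i.toNat (by omega)

theorem slice_sum (a : List Int) (il ir : Int) (h0 : 0 ≤ il) (hle : il ≤ ir) :
    (PySem.List.slice a (some il) (some ir)).sum
      = (a.take ir.toNat).sum - (a.take il.toNat).sum := by
  have hb : (0:Int) ≤ ir := by omega
  rw [PySem.List.slice_toNat a h0 hb]
  have h : a.take ir.toNat = a.take il.toNat ++ (a.drop il.toNat).take (ir.toNat - il.toNat) := by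
    rw [← List.take_add]; congr 1; omega
  rw [h, List.sum_append]; ring

-- the two tests agree: slice-sum zero ↔ equal prefix entries
theorem test_eq (a : List Int) (il ir : Int) (h0 : 0 ≤ il) (hle : il ≤ ir)
    (hir : ir ≤ (a.length : Int)) :
    ((PySem.List.slice a (some il) (some ir)).sum = 0
      ↔ PySem.List.pyGetD ([0] ++ preFrom 0 a) il 0
          = PySem.List.pyGetD ([0] ++ preFrom 0 a) ir 0) := by
  rw [slice_sum a il ir h0 hle, pyGetD_pre a il h0 (by omega), pyGetD_pre a ir (by omega) hir]
  omega

theorem altAdvance_stop (pre : List Int) (r il : Int)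
    (h : ¬ (il < r ∧ PySem.List.pyGetD pre il 0 = PySem.List.pyGetD pre r 0)) :
    altAdvance pre r il = il := by
  rw [altAdvance.eq_def]; simp [h]

theorem altAdvance_go (pre : List Int) (r il : Int)
    (h : il < r ∧ PySem.List.pyGetD pre il 0 = PySem.List.pyGetD pre r 0) :
    altAdvance pre r il = altAdvance pre r (il + 1) := by
  rw [altAdvance.eq_def]; simp [h]

theorem bFrom_stop (pre : List Int) (n cnt il r : Int) (h : n < r) :
    bFrom pre n cnt il r = cnt := by
  unfold bFrom
  rw [PySem.List.pyRange_one_eq_nil (by omega)]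
  rfl

theorem bFrom_step (pre : List Int) (n cnt il r : Int) (h : r ≤ n) :
    bFrom pre n cnt il r
      = bFrom pre n (cnt + (r - altAdvance pre r il)) (altAdvance pre r il) (r + 1) := by
  unfold bFrom
  rw [PySem.List.pyRange_one_cons (by omega)]
  rfl

-- A's outer loop returns cnt unchanged once the frontier is exhausted (ir > n)
theorem outer_tail (n : Int) (a : List Int) : ∀ (m : Nat) (cnt il ir : Int),
    (n - il).toNat ≤ m → n < ir → solveOuter n a cnt il ir = cnt := by
  intro m
  induction m with
  | zero =>
    intro cnt il ir hm hir
    rw [solveOuter.eq_def]; simp only [dif_neg (by omega : ¬ il < n)]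
  | succ m ih =>
    intro cnt il ir hm hir
    by_cases hil : il < n
    · rw [solveOuter.eq_def]
      simp only [dif_pos hil]
      have hin : solveInner n a il cnt ir = (cnt, ir) := by
        rw [solveInner.eq_def]; simp only [dif_neg (by omega : ¬ ir ≤ n)]
      rw [hin]
      simp only
      rw [if_neg (by omega : ¬ il + 1 = ir)]
      exact ih cnt (il + 1) ir (by omega) hir
    · rw [solveOuter.eq_def]; simp only [dif_neg hil]

-- when the current window sum is nonzero, A advances the frontier and counts
theorem outer_succ (n : Int) (a : List Int) (cnt il ir : Int) (hil : il < n) (hir : ir ≤ n)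
    (ht : (PySem.List.slice a (some il) (some ir)).sum ≠ 0) :
    solveOuter n a cnt il ir = solveOuter n a (cnt + (ir - il)) il (ir + 1) := by
  conv_lhs => rw [solveOuter.eq_def]
  conv_rhs => rw [solveOuter.eq_def]
  simp only [dif_pos hil]
  have : solveInner n a il cnt ir = solveInner n a il (cnt + (ir - il)) (ir + 1) := by
    rw [solveInner.eq_def]; simp only [dif_pos hir, if_pos ht]
  rw [this]

-- when the current window sum is zero, A breaks: il advances (and ir skips if they meet)
theorem outer_fail (n : Int) (a : List Int) (cnt il ir : Int) (hil : il < n) (hir : ir ≤ n)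
    (ht : (PySem.List.slice a (some il) (some ir)).sum = 0) :
    solveOuter n a cnt il ir
      = solveOuter n a cnt (il + 1) (if il + 1 = ir then ir + 1 else ir) := by
  conv_lhs => rw [solveOuter.eq_def]
  simp only [dif_pos hil]
  have hin : solveInner n a il cnt ir = (cnt, ir) := by
    rw [solveInner.eq_def]; simp only [dif_pos hir, if_neg (not_not_intro ht)]
  rw [hin]

theorem main_sim (n : Int) (a : List Int) (hn : n ≤ (a.length : Int)) :
    ∀ (m : Nat) (cnt il ir : Int), (2 * n + 2 - il - ir).toNat ≤ m →
      0 ≤ il → il < ir → ir ≤ n + 1 →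
      solveOuter n a cnt il ir = bFrom ([0] ++ preFrom 0 a) n cnt il ir := by
  intro m
  induction m with
  | zero =>
    intro cnt il ir hm h0 hlt hle
    -- measure 0 forces ir > n (else 2n+2-il-ir ≥ 2)
    have hir : n < ir := by omega
    rw [outer_tail n a (n - il).toNat cnt il ir (le_refl _) hir, bFrom_stop _ _ _ _ _ hir]
  | succ m ih =>
    intro cnt il ir hm h0 hlt hle
    by_cases hir : ir ≤ n
    · have hil : il < n := by omega
      set pre := ([0] ++ preFrom 0 a) with hpre
      by_cases ht : (PySem.List.slice a (some il) (some ir)).sum = 0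
      · -- window sum zero: both sides advance il (B inside altAdvance)
        have heqp : PySem.List.pyGetD pre il 0 = PySem.List.pyGetD pre ir 0 :=
          (test_eq a il ir h0 (by omega) (by omega)).1 ht
        have hadv : altAdvance pre ir il = altAdvance pre ir (il + 1) :=
          altAdvance_go pre ir il ⟨hlt, heqp⟩
        rw [outer_fail n a cnt il ir hil hir ht]
        by_cases hmeet : il + 1 = ir
        · rw [if_pos hmeet]
          rw [ih cnt (il + 1) (ir + 1) (by omega) (by omega) (by omega) (by omega)]
          rw [bFrom_step pre n cnt il ir hir, hadv,
              altAdvance_stop pre ir (il + 1) (by omega)]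
          rw [hmeet]
          simp
        · rw [if_neg hmeet]
          rw [ih cnt (il + 1) ir (by omega) (by omega) (by omega) (by omega)]
          rw [bFrom_step pre n cnt il ir hir, hadv, ← bFrom_step pre n cnt (il + 1) ir hir]
      · -- window sum nonzero: both sides count ir - il and advance the frontier
        have hnep : ¬ (il < ir ∧ PySem.List.pyGetD pre il 0 = PySem.List.pyGetD pre ir 0) := by
          intro hc
          exact ht ((test_eq a il ir h0 (by omega) (by omega)).2 hc.2)
        rw [outer_succ n a cnt il ir hil hir ht]
        rw [ih (cnt + (ir - il)) il (ir + 1) (by omega) h0 (by omega) (by omega)]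
        rw [bFrom_step pre n cnt il ir hir, altAdvance_stop pre ir il hnep]
    · have hir' : n < ir := by omega
      rw [outer_tail n a (n - il).toNat cnt il ir (le_refl _) hir',
          bFrom_stop _ _ _ _ _ hir']

-- ===== VERDICT (by name: the statement is the Claim_ definition above) =====
theorem solve_spec : Claim_equal_solve := by
  intro n a _ hpre
  unfold Spec_solve
  show solve n a = solve_alt n a
  have halt : solve_alt n a = bFrom ([0] ++ preFrom 0 a) n 0 0 1 := by
    unfold solve_alt bFrom
    rw [foldl_pre]
  rw [halt]
  by_cases hn : 0 ≤ n
  · exact main_sim n a hpre (2 * n + 1).toNat 0 0 1 (by omega) (by omega) (by omega) (by omega)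
  · have hA : solve n a = 0 := by
      unfold solve; rw [solveOuter.eq_def]; simp only [dif_neg (by omega : ¬ (0:Int) < n)]
    rw [hA, bFrom_stop _ _ _ _ _ (by omega)]
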